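-- pv_equiv track=rewrite | github.com/DieG02/python-lab | lab_10/block_02/test-03.py | get_secret
-- ===== SOURCE A (Python) =====
-- def get_secret(word: str) -> str:
--   word = word.upper().strip().replace("J", "I")
--   aux = set(word)
--   key = []
--   for _, ch in enumerate(word):
--     if ch in aux:
--       key.append(ch)
--       aux.remove(ch)
--   return "".join(key)
-- ===== SOURCE B (Python) =====
-- def get_secret(word: str) -> str:
--   word = word.upper().strip().replace("J", "I")
--   key = []
--   while word:
--     ch = word[0]
--     key.append(ch)
--     word = word.replace(ch, "")
--   return "".join(key)
-- ===== Notes on version B (the rewrite author's own statement) =====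
-- stated objective: alternative
-- what changed: A makes one pass with an auxiliary seen-set and a membership branch; B instead loops 'take the first remaining character, then delete every occurrence of it from the string with replace', so no set and no membership test exist and the string shrinks between iterations.
import Mathlib
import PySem

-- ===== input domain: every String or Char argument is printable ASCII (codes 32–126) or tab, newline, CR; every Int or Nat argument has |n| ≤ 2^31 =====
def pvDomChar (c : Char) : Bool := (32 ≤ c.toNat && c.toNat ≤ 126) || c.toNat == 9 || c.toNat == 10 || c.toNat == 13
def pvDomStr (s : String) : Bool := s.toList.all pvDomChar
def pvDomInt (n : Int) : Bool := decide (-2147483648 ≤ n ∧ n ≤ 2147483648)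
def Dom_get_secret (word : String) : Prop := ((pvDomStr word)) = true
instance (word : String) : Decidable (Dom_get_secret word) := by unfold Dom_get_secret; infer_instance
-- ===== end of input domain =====

-- B replaces A's single seen-set pass by a repeated-elimination loop: take the first
-- remaining character, delete ALL its occurrences from the rest, repeat (alternative
-- algorithm, same return value).

-- ===== PORT A =====
-- the loop body is 'if ch in aux: key.append(ch); aux.remove(ch)'
-- (aux.remove(ch) is PySem.Set.remove?; in this branch ch ∈ aux, so remove? is some and
--  '.getD st.2' never takes its default — exact, no KeyError is reachable)
def pvStepA (st : List Char × PySem.Set Char) (iv : Int × Char) : List Char × PySem.Set Char :=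
  if st.2.contains iv.2 then (st.1 ++ [iv.2], (PySem.Set.remove? st.2 iv.2).getD st.2)
  else st

def get_secret (word : String) : String :=
  let w := PySem.Str.replace (PySem.Str.strip (PySem.Str.upper word)) "J" "I"
  let aux : PySem.Set Char := PySem.Set.ofList w.toList
  let r := (PySem.List.enumerate w.toList).foldl pvStepA ([], aux)
  String.mk r.1

-- ===== PORT B =====
-- the while loop of Source B: key.append(word[0]); word = word.replace(word[0], "").
-- word.replace(ch, "") with a single character ch deletes exactly the occurrences of
-- ch, i.e. it is List.filter (x ≠ ch) on the characters — exact.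
def pvLoopB (key : List Char) (w : List Char) : List Char :=
  match w with
  | [] => key
  | c :: cs => pvLoopB (key ++ [c]) ((c :: cs).filter (fun x => !(x == c)))
termination_by w.length
decreasing_by
  simp only [List.filter_cons, beq_self_eq_true, Bool.not_true, List.length_cons]
  exact Nat.lt_succ_of_le (List.length_filter_le _ _)

def get_secret_alt (word : String) : String :=
  let w := PySem.Str.replace (PySem.Str.strip (PySem.Str.upper word)) "J" "I"
  String.mk (pvLoopB [] w.toList)

-- ===== PRECONDITION & SPEC =====
def Spec_get_secret (word : String) (out : String) : Prop := out = get_secret_alt word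
instance (word : String) (out : String) : Decidable (Spec_get_secret word out) := by unfold Spec_get_secret; infer_instance

-- ===== CLAIM (what is proved, stated in full; the proofs are below) =====
def Claim_equal_get_secret : Prop := ∀ (word : String), Dom_get_secret word → Spec_get_secret word (get_secret word)

-- ===== LEMMAS AND PROOFS =====

-- folding Set.add into s appends exactly the first occurrences not already in s
theorem pv_foldl_add (xs : List Char) (s : List Char) :
    List.foldl PySem.Set.add s xs
      = s ++ (PySem.Set.ofList xs).filter (fun x => !decide (x ∈ s)) := by
  induction xs generalizing s with
  | nil => simp [PySem.Set.ofList, PySem.Set.empty]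
  | cons c cs ih =>
    have hofl : PySem.Set.ofList (c :: cs)
        = c :: (PySem.Set.ofList cs).filter (fun x => !decide (x = c)) := by
      have h := ih ([c] : List Char)
      simp only [PySem.Set.ofList, PySem.Set.empty] at h ⊢
      rw [List.foldl_cons, show PySem.Set.add [] c = [c] by simp [PySem.Set.add], h]
      simp
    rw [List.foldl_cons, ih (PySem.Set.add s c), hofl]
    by_cases hc : c ∈ s
    · have hadd : PySem.Set.add s c = s := by
        simp [PySem.Set.add, List.contains_eq_mem, hc]
      rw [hadd]
      congr 1
      rw [List.filter_cons]
      simp only [hc, decide_true, Bool.not_true, Bool.false_eq_true, if_false,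
        List.filter_filter]
      refine (List.filter_congr fun x _ => ?_).symm
      by_cases hx : x ∈ s
      · simp [hx]
      · have hne : x ≠ c := fun h => hx (h ▸ hc)
        simp [hx, hne]
    · have hadd : PySem.Set.add s c = s ++ [c] := by
        simp [PySem.Set.add, List.contains_eq_mem, hc]
      rw [hadd, List.append_assoc]
      congr 1
      rw [List.filter_cons]
      simp only [hc, decide_false, Bool.not_false, if_true, List.filter_filter,
        List.singleton_append]
      congr 1
      refine List.filter_congr fun x _ => ?_
      by_cases hx : x ∈ s <;> by_cases hxc : x = c <;>
        simp [hx, hxc, hc, List.mem_append]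

-- ofList in head form
theorem pv_ofList_cons (c : Char) (cs : List Char) :
    PySem.Set.ofList (c :: cs) = c :: (PySem.Set.ofList cs).filter (fun x => !decide (x = c)) := by
  have h := pv_foldl_add cs ([c] : List Char)
  simp only [PySem.Set.ofList, PySem.Set.empty]
  rw [List.foldl_cons, show PySem.Set.add [] c = [c] by simp [PySem.Set.add], h]
  simp [PySem.Set.ofList, PySem.Set.empty]

theorem pv_mem_discard (aux : List Char) (c x : Char) :
    decide (x ∈ PySem.Set.discard aux c) = (!decide (x = c) && decide (x ∈ aux)) := by
  by_cases hx : x ∈ aux <;> by_cases hxc : x = c <;>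
    simp [PySem.Set.discard, List.mem_filter, hx, hxc]

-- the loop of A, started on any key/aux, keeps exactly the first occurrences still in aux
theorem pv_loop (l : List Char) (n : Int) (key : List Char) (aux : PySem.Set Char) :
    ((PySem.List.enumerate l n).foldl pvStepA (key, aux)).1
    = key ++ (PySem.Set.ofList l).filter (fun c => decide (c ∈ aux)) := by
  induction l generalizing n key aux with
  | nil => simp [PySem.List.enumerate, PySem.Set.ofList, PySem.Set.empty]
  | cons c cs ih =>
    rw [show PySem.List.enumerate (c :: cs) n = (n, c) :: PySem.List.enumerate cs (n + 1) from rfl]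
    rw [List.foldl_cons, pv_ofList_cons]
    by_cases hc : c ∈ aux
    · have hrem : PySem.Set.remove? aux c = some (PySem.Set.discard aux c) :=
        PySem.Set.remove?_of_mem hc
      have hstep : pvStepA (key, aux) (n, c) = (key ++ [c], PySem.Set.discard aux c) := by
        simp [pvStepA, List.contains_eq_mem, hc, hrem]
      rw [hstep, ih]
      rw [List.filter_cons]
      simp only [hc, decide_true, if_true, List.filter_filter, List.append_assoc,
        List.singleton_append]
      congr 2
      refine List.filter_congr fun x _ => ?_
      rw [pv_mem_discard, Bool.and_comm]
    · have hstep : pvStepA (key, aux) (n, c) = (key, aux) := by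
        simp [pvStepA, List.contains_eq_mem, hc]
      rw [hstep, ih, List.filter_cons]
      simp only [hc, decide_false, Bool.false_eq_true, if_false, List.filter_filter]
      congr 1
      refine (List.filter_congr fun x _ => ?_).symm
      by_cases hxc : x = c
      · simp [hxc, hc]
      · simp [hxc]

theorem pv_filter_self (l : List Char) :
    (PySem.Set.ofList l).filter (fun c => decide (c ∈ PySem.Set.ofList l))
      = PySem.Set.ofList l :=
  List.filter_eq_self.mpr (fun x hx => by simp [hx])

-- ofList commutes with filter
theorem pv_ofList_filter (l : List Char) (p : Char → Bool) :
    PySem.Set.ofList (l.filter p) = (PySem.Set.ofList l).filter p := by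
  induction l with
  | nil => simp [PySem.Set.ofList, PySem.Set.empty]
  | cons c cs ih =>
    rw [pv_ofList_cons, List.filter_cons]
    by_cases hp : p c = true
    · rw [if_pos hp, pv_ofList_cons, ih, List.filter_cons, if_pos hp,
        List.filter_filter, List.filter_filter]
      congr 1
      exact List.filter_congr fun x _ => by rw [Bool.and_comm]
    · have hp' : p c = false := by simpa using hp
      rw [if_neg hp, ih]
      simp only [List.filter_cons, hp', Bool.false_eq_true, if_false, List.filter_filter]
      refine (List.filter_congr fun x _ => ?_).symm
      by_cases hxc : x = c
      · simp [hxc, hp']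
      · simp [hxc]

-- B's loop computes the first-occurrence deduplication
theorem pv_loopB_eq (key w : List Char) :
    pvLoopB key w = key ++ PySem.Set.ofList w := by
  induction key, w using pvLoopB.induct with
  | case1 key => simp [pvLoopB, PySem.Set.ofList, PySem.Set.empty]
  | case2 key c cs ih =>
    rw [pvLoopB, ih, pv_ofList_cons]
    have hfc : (c :: cs).filter (fun x => !(x == c)) = cs.filter (fun x => !(x == c)) := by
      simp
    rw [hfc, pv_ofList_filter, List.append_assoc, List.singleton_append]
    congr 2

-- ===== VERDICT (by name: the statement is the Claim_ definition above) =====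
theorem get_secret_spec : Claim_equal_get_secret := by
  intro word _
  unfold Spec_get_secret get_secret get_secret_alt
  simp only [pv_loop, List.nil_append, pv_filter_self, pv_loopB_eq]
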